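-- pv_equiv track=rewrite | github.com/Saisusmitha27/Chronosync | agents/drafting_agent.py | _enforce_script_length
-- ===== SOURCE A (Python) =====
-- MIN_WORDS = 80
--
-- MAX_WORDS = 110
--
-- def _enforce_script_length(script: str) -> str:
--     words = str(script or "").split()
--     if not words:
--         script = (
--             "This video explains the topic clearly, shows practical examples, and gives viewers a simple action "
--             "they can take today to get better results."
--         )
--         words = script.split()
--     if len(words) < MIN_WORDS:
--         filler = (
--             " It also highlights real world use cases, common mistakes to avoid, measurable outcomes, and "
--             "step by step guidance for viewers."
--         )
--         while len(words) < MIN_WORDS: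
--             script += filler
--             words = script.split()
--     if len(words) > MAX_WORDS:
--         script = " ".join(words[:MAX_WORDS])
--     if script and script[-1] not in ".!?":
--         script += "."
--     lower_script = script.lower()
--     if not any(k in lower_script for k in ["in conclusion", "finally", "to sum up", "take action", "start today"]):
--         script += " In conclusion, take one action today and stay consistent."
--     return script
-- ===== SOURCE B (Python) =====
-- MIN_WORDS = 80
--
-- MAX_WORDS = 110
--
-- _DEFAULT = (
--     "This video explains the topic clearly, shows practical examples, and gives viewers a simple action "
--     "they can take today to get better results."
-- )
--
-- _FILLER = (
--     " It also highlights real world use cases, common mistakes to avoid, measurable outcomes, and "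
--     "step by step guidance for viewers."
-- )
--
-- _FILLER_WORDS = 20  # the filler always contributes exactly 20 words
--
-- _KEYS = ["in conclusion", "finally", "to sum up", "take action", "start today"]
--
--
-- def _base(s):
--     return s if s.split() else _DEFAULT
--
--
-- def _pad(s):
--     n = len(s.split())
--     if n < MIN_WORDS:
--         s += _FILLER * ((MIN_WORDS - n + _FILLER_WORDS - 1) // _FILLER_WORDS)
--     return s
--
--
-- def _truncate(s):
--     w = s.split()
--     return " ".join(w[:MAX_WORDS]) if len(w) > MAX_WORDS else s
--
--
-- def _punctuate(s):
--     return s + "." if s and s[-1] not in ".!?" else s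
--
--
-- def _conclude(s):
--     low = s.lower()
--     return s if any(k in low for k in _KEYS) else s + " In conclusion, take one action today and stay consistent."
--
--
-- def _enforce_script_length(script: str) -> str:
--     return _conclude(_punctuate(_truncate(_pad(_base(str(script or ""))))))
-- ===== Notes on version B (the rewrite author's own statement) =====
-- stated objective: simpler
-- what changed: The iterative pad loop (append filler, re-split, re-count each pass) is replaced by a closed-form repetition count (each filler adds exactly 20 words, so append ceil((80-n)/20) fillers at once), and the function is decomposed into a pipeline of small single-purpose helpers.
import Mathlib
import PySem

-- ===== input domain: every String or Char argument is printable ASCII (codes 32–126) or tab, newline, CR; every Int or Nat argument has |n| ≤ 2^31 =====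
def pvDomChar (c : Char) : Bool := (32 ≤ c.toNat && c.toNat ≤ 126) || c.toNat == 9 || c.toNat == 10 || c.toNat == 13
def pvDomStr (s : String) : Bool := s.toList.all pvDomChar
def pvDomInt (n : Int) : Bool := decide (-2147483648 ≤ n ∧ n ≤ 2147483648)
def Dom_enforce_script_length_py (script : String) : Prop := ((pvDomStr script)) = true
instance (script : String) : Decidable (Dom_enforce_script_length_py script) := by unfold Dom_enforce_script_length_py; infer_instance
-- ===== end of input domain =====

set_option maxRecDepth 1000000

-- B replaces A's iterative pad-and-resplit while-loop by a closed-form repetition count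
-- (each filler block adds exactly 20 words) and decomposes the function into a pipeline
-- of small helpers; objective: simpler.

-- ===== PORT A =====
-- constants of A (module-level literals inlined in A's code)
def pvDefaultA : String := "This video explains the topic clearly, shows practical examples, and gives viewers a simple action they can take today to get better results."
def pvFillerA : String := " It also highlights real world use cases, common mistakes to avoid, measurable outcomes, and step by step guidance for viewers."
def pvConclA : String := " In conclusion, take one action today and stay consistent."
def pvKeysA : List String := ["in conclusion", "finally", "to sum up", "take action", "start today"]

-- the tail of the filler after its leading space (used only to state the termination lemma)
def pvFillerTail : String := "It also highlights real world use cases, common mistakes to avoid, measurable outcomes, and step by step guidance for viewers."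

-- go s cur acc only *appends* to acc (accumulator can be pulled out front)
theorem pvGoAcc (s : List Char) : ∀ (cur : List Char) (acc : List (List Char)),
    PySem.Chars.split₀.go s cur acc = acc.reverse ++ PySem.Chars.split₀.go s cur [] := by
  induction s with
  | nil =>
      intro cur acc
      show (if cur.isEmpty then acc.reverse else (cur.reverse :: acc).reverse)
        = acc.reverse ++ (if cur.isEmpty then ([] : List (List Char)).reverse else (cur.reverse :: ([] : List (List Char))).reverse)
      split_ifs <;> simp
  | cons c rest ih =>
      intro cur acc
      show (if PySem.Chars.isspace c then (if cur.isEmpty then PySem.Chars.split₀.go rest [] acc else PySem.Chars.split₀.go rest [] (cur.reverse :: acc)) else PySem.Chars.split₀.go rest (c :: cur) acc)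
        = acc.reverse ++ (if PySem.Chars.isspace c then (if cur.isEmpty then PySem.Chars.split₀.go rest [] [] else PySem.Chars.split₀.go rest [] (cur.reverse :: [])) else PySem.Chars.split₀.go rest (c :: cur) [])
      split_ifs with h1 h2
      · exact ih [] acc
      · rw [ih [] (cur.reverse :: acc), ih [] [cur.reverse]]; simp
      · exact ih (c :: cur) acc

-- splitting around an explicit space splits the word lists
theorem pvGoAppend (cs : List Char) : ∀ (cur : List Char) (acc : List (List Char)) (ds : List Char),
    PySem.Chars.split₀.go (cs ++ ' ' :: ds) cur acc
      = PySem.Chars.split₀.go cs cur acc ++ PySem.Chars.split₀.go ds [] [] := by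
  induction cs with
  | nil =>
      intro cur acc ds
      show (if PySem.Chars.isspace ' ' then (if cur.isEmpty then PySem.Chars.split₀.go ds [] acc else PySem.Chars.split₀.go ds [] (cur.reverse :: acc)) else PySem.Chars.split₀.go ds (' ' :: cur) acc)
        = (if cur.isEmpty then acc.reverse else (cur.reverse :: acc).reverse) ++ PySem.Chars.split₀.go ds [] []
      rw [if_pos (by decide : PySem.Chars.isspace ' ' = true)]
      split_ifs with h
      · exact pvGoAcc ds [] acc
      · rw [pvGoAcc ds [] (cur.reverse :: acc)]
  | cons c rest ih =>
      intro cur acc ds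
      show (if PySem.Chars.isspace c then (if cur.isEmpty then PySem.Chars.split₀.go (rest ++ ' ' :: ds) [] acc else PySem.Chars.split₀.go (rest ++ ' ' :: ds) [] (cur.reverse :: acc)) else PySem.Chars.split₀.go (rest ++ ' ' :: ds) (c :: cur) acc)
        = (if PySem.Chars.isspace c then (if cur.isEmpty then PySem.Chars.split₀.go rest [] acc else PySem.Chars.split₀.go rest [] (cur.reverse :: acc)) else PySem.Chars.split₀.go rest (c :: cur) acc) ++ PySem.Chars.split₀.go ds [] []
      split_ifs <;> apply ih

-- appending the filler always adds exactly 20 words (needed for the loop's termination)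
theorem pvLenSplitFiller (s : String) :
    (PySem.Str.split₀ (s ++ pvFillerA)).length = (PySem.Str.split₀ s).length + 20 := by
  simp only [PySem.Str.split₀, List.length_map, String.toList_append]
  have h : pvFillerA.toList = ' ' :: pvFillerTail.toList := rfl
  rw [h]
  show (PySem.Chars.split₀.go (s.toList ++ ' ' :: pvFillerTail.toList) [] []).length = _
  rw [pvGoAppend]
  have h20 : (PySem.Chars.split₀.go pvFillerTail.toList [] []).length = 20 := by decide
  simp [PySem.Chars.split₀, h20]

-- the while-loop of A: append filler and re-split until MIN_WORDS words
-- (Python keeps `words` alongside `script`; the invariant words = script.split() is inlined)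
def padLoopA (script : String) : String :=
  if (PySem.Str.split₀ script).length < 80 then padLoopA (script ++ pvFillerA)
  else script
termination_by 80 - (PySem.Str.split₀ script).length
decreasing_by
  rw [pvLenSplitFiller]; omega

def enforce_script_length_py (script : String) : String :=
  -- words = str(script or "").split()
  let s0 := if script = "" then "" else script
  let words := PySem.Str.split₀ s0
  -- if not words: script = DEFAULT; words = script.split()
  let script1 := if words.isEmpty then pvDefaultA else script
  -- while len(words) < MIN_WORDS: script += filler; words = script.split()
  let script2 := padLoopA script1
  let words2 := PySem.Str.split₀ script2
  -- if len(words) > MAX_WORDS: script = " ".join(words[:MAX_WORDS])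
  let script3 := if words2.length > 110 then PySem.Str.join " " (PySem.List.slice words2 none (some 110)) else script2
  -- if script and script[-1] not in ".!?": script += "."
  let endsPunct := match PySem.Str.pyGet? script3 (-1) with
    | some c => PySem.Str.isIn (String.singleton c) ".!?"
    | none => false
  let script4 := if script3 ≠ "" ∧ endsPunct = false then script3 ++ "." else script3
  -- conclusion-keyword check on the lowered script
  let lowerScript := PySem.Str.lower script4
  if pvKeysA.any (fun k => PySem.Str.isIn k lowerScript) then script4 else script4 ++ pvConclA

-- ===== PORT B =====
-- module constants of Source B
def pvDefaultB : String := "This video explains the topic clearly, shows practical examples, and gives viewers a simple action they can take today to get better results."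
def pvFillerB : String := " It also highlights real world use cases, common mistakes to avoid, measurable outcomes, and step by step guidance for viewers."
def pvKeysB : List String := ["in conclusion", "finally", "to sum up", "take action", "start today"]

-- filler * reps (Python string repetition)
def pvStrRepeat (s : String) : Nat → String
  | 0 => ""
  | n + 1 => s ++ pvStrRepeat s n

def pvBase (s : String) : String :=
  if (PySem.Str.split₀ s).isEmpty then pvDefaultB else s

-- closed-form padding: each filler adds exactly 20 words, so append ceil((80-n)/20) fillers at once
def pvPad (s : String) : String :=
  let n := (PySem.Str.split₀ s).length
  if n < 80 then s ++ pvStrRepeat pvFillerB ((80 - n + 20 - 1) / 20) else s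

def pvTruncate (s : String) : String :=
  let w := PySem.Str.split₀ s
  if w.length > 110 then PySem.Str.join " " (PySem.List.slice w none (some 110)) else s

def pvPunctuate (s : String) : String :=
  let endsPunct := match PySem.Str.pyGet? s (-1) with
    | some c => PySem.Str.isIn (String.singleton c) ".!?"
    | none => false
  if s ≠ "" ∧ endsPunct = false then s ++ "." else s

def pvConclude (s : String) : String :=
  if pvKeysB.any (fun k => PySem.Str.isIn k (PySem.Str.lower s)) then s
  else s ++ " In conclusion, take one action today and stay consistent."

def enforce_script_length_py_alt (script : String) : String :=
  pvConclude (pvPunctuate (pvTruncate (pvPad (pvBase (if script = "" then "" else script)))))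

-- ===== PRECONDITION & SPEC =====
def Spec_enforce_script_length_py (script : String) (out : String) : Prop := out = enforce_script_length_py_alt script
instance (script : String) (out : String) : Decidable (Spec_enforce_script_length_py script out) := by unfold Spec_enforce_script_length_py; infer_instance

-- ===== CLAIM (what is proved, stated in full; the proofs are below) =====
def Claim_equal_enforce_script_length_py : Prop := ∀ (script : String), Dom_enforce_script_length_py script → Spec_enforce_script_length_py script (enforce_script_length_py script)

-- ===== LEMMAS AND PROOFS =====

-- A's pad loop equals B's closed-form padding
theorem pvFillerBA : pvFillerB = pvFillerA := rfl

theorem pvPadLoopEq (script : String) : padLoopA script = pvPad script := by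
  fun_induction padLoopA script with
  | case1 s h ih =>
      rw [ih]
      unfold pvPad
      rw [pvLenSplitFiller]
      simp only [pvFillerBA]
      set n := (PySem.Str.split₀ s).length with hn
      rw [if_pos h]
      by_cases h2 : n + 20 < 80
      · rw [if_pos h2]
        have hr : (80 - n + 20 - 1) / 20 = (80 - (n + 20) + 20 - 1) / 20 + 1 := by omega
        rw [hr]
        show (s ++ pvFillerA) ++ pvStrRepeat pvFillerA ((80 - (n + 20) + 20 - 1) / 20)
          = s ++ (pvFillerA ++ pvStrRepeat pvFillerA ((80 - (n + 20) + 20 - 1) / 20))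
        exact String.append_assoc
      · rw [if_neg h2]
        have hr : (80 - n + 20 - 1) / 20 = 1 := by omega
        rw [hr]
        show s ++ pvFillerA = s ++ (pvFillerA ++ "")
        simp
  | case2 s h =>
      unfold pvPad
      rw [if_neg h]

theorem pvMain (script : String) : enforce_script_length_py script = enforce_script_length_py_alt script := by
  show pvConclude (pvPunctuate (pvTruncate (padLoopA
        (if (PySem.Str.split₀ (if script = "" then "" else script)).isEmpty then pvDefaultA else script))))
      = pvConclude (pvPunctuate (pvTruncate (pvPad (pvBase (if script = "" then "" else script)))))
  rw [pvPadLoopEq]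
  apply congrArg; apply congrArg; apply congrArg; apply congrArg
  by_cases h : script = ""
  · subst h
    rfl
  · rw [if_neg h]
    unfold pvBase
    by_cases he : (PySem.Str.split₀ script).isEmpty
    · rw [if_pos he, if_pos he]; rfl
    · rw [if_neg he, if_neg he]

-- ===== VERDICT (by name: the statement is the Claim_ definition above) =====
theorem enforce_script_length_py_spec : Claim_equal_enforce_script_length_py := by
  intro script _
  exact pvMain script
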